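-- pv_equiv track=rewrite | github.com/szufix/mapel | mapel-elections/src/mapel/elections/objects/ElectionFeatures.py | scores_to_winners
-- ===== SOURCE A (Python) =====
-- def scores_to_winners(scores: list):
--     to_sort = dict()
--     for i in range(0, len(scores)):
--         if scores[i] in to_sort:
--             to_sort[scores[i]].append(i)
--         else:
--             to_sort[scores[i]] = [i]
--     result = []
--     for key in sorted(to_sort, reverse=True):
--         result += to_sort[key]
--     return result
-- ===== SOURCE B (Python) =====
-- def scores_to_winners(scores: list):
--     return sorted(range(len(scores)), key=lambda i: scores[i], reverse=True)
-- ===== Notes on version B (the rewrite author's own statement) =====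
-- stated objective: faster
-- what changed: Replaced the value->indices dict grouping plus a descending sort of the distinct keys and bucket concatenation with a single stable descending key-sort of the index range (ties stay in ascending index order by sort stability).
import Mathlib
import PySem

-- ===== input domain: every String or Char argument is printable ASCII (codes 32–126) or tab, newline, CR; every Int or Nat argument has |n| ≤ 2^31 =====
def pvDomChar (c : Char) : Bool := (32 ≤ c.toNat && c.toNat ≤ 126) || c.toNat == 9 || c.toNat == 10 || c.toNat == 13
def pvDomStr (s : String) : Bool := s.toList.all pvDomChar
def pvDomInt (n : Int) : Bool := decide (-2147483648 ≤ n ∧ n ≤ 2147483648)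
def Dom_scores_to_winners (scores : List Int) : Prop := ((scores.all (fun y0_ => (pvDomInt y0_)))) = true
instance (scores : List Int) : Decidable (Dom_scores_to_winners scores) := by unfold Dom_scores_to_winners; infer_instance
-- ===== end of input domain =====

-- B replaces A's value→indices dict grouping + descending key sort + bucket concatenation by one
-- stable descending key-sort of the index range (measurably faster in a timing run; same return value).

-- ===== PORT A =====
-- literal transliteration of A: build the dict value → list of indices, then concatenate the
-- buckets of the keys sorted in descending order. scores[i] is always in range (i ∈ range(len)),
-- so pyGetD with default 0 is exact.
def scores_to_winners (scores : List Int) : List Int :=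
  let to_sort := (PySem.List.pyRange 0 (PySem.List.len scores) 1).foldl
    (fun d i =>
      if d.contains (PySem.List.pyGetD scores i 0) then
        d.modify (PySem.List.pyGetD scores i 0) [] (fun l => l ++ [i])
      else
        d.insert (PySem.List.pyGetD scores i 0) [i])
    PySem.Dict.empty
  (PySem.List.sorted (PySem.Dict.keys to_sort) (fun x => x) true).foldl
    (fun result key => result ++ PySem.Dict.getD to_sort key []) []

-- ===== PORT B =====
-- literal transliteration of B: sorted(range(len(scores)), key=lambda i: scores[i], reverse=True)
def scores_to_winners_alt (scores : List Int) : List Int :=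
  PySem.List.sorted (PySem.List.pyRange 0 (PySem.List.len scores) 1)
    (fun i => PySem.List.pyGetD scores i 0) true

-- ===== PRECONDITION & SPEC =====
def Spec_scores_to_winners (scores : List Int) (out : List Int) : Prop := out = scores_to_winners_alt scores
instance (scores : List Int) (out : List Int) : Decidable (Spec_scores_to_winners scores out) := by unfold Spec_scores_to_winners; infer_instance

-- ===== CLAIM (what is proved, stated in full; the proofs are below) =====
def Claim_equal_scores_to_winners : Prop := ∀ (scores : List Int), Dom_scores_to_winners scores → Spec_scores_to_winners scores (scores_to_winners scores)

-- ===== LEMMAS AND PROOFS =====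

-- The order both programs arrange the indices in: higher score first, ties by ascending index.
def pvR (k : Int → Int) (a b : Int) : Prop := k b < k a ∨ (k a = k b ∧ a < b)

-- one dict-building step of A, abstracted over the score lookup k
def pvStep (k : Int → Int) (d : PySem.Dict Int (List Int)) (i : Int) : PySem.Dict Int (List Int) :=
  if d.contains (k i) then d.modify (k i) [] (fun l => l ++ [i]) else d.insert (k i) [i]

theorem pvBuild_keys (k : Int → Int) (l : List Int) :
    (l.foldl (pvStep k) PySem.Dict.empty).keys = PySem.Set.ofList (l.map k) := by
  induction l using List.reverseRecOn with
  | nil => rfl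
  | append_singleton l x ih =>
    rw [List.foldl_append]
    simp only [List.map_append, List.map_cons, List.map_nil]
    rw [PySem.Set.ofList_append_singleton, PySem.Set.add_eq_ite]
    simp only [List.foldl_cons, List.foldl_nil, pvStep]
    by_cases h : k x ∈ PySem.Set.ofList (l.map k)
    · have hc : (l.foldl (pvStep k) PySem.Dict.empty).contains (k x) = true := by
        rw [PySem.Dict.contains_iff_mem_keys, ih]; exact h
      rw [if_pos hc, if_pos h, PySem.Dict.keys_modify,
          PySem.Dict.keys_insert_of_contains _ _ hc, ih]
    · have hc : (l.foldl (pvStep k) PySem.Dict.empty).contains (k x) = false := by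
        rw [Bool.eq_false_iff]
        intro hcc
        exact h (ih ▸ (PySem.Dict.contains_iff_mem_keys _ _).mp hcc)
      rw [if_neg (by simp [hc]), if_neg h,
          PySem.Dict.keys_insert_of_not_contains _ _ hc, ih]

theorem pvBuild_getD (k : Int → Int) (l : List Int) (v : Int) :
    (l.foldl (pvStep k) PySem.Dict.empty).getD v [] = l.filter (fun i => decide (k i = v)) := by
  induction l using List.reverseRecOn with
  | nil => rfl
  | append_singleton l x ih =>
    rw [List.foldl_append, List.filter_append]
    simp only [List.foldl_cons, List.foldl_nil, pvStep, List.filter_cons, List.filter_nil]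
    by_cases hc : (l.foldl (pvStep k) PySem.Dict.empty).contains (k x) = true
    · rw [if_pos hc, PySem.Dict.getD_modify]
      by_cases hv : v = k x
      · subst hv; rw [if_pos rfl, ih]; simp
      · rw [if_neg hv, ih]
        have : (decide (k x = v)) = false := by simp; intro h; exact hv h.symm
        simp [this]
    · rw [if_neg hc, PySem.Dict.getD_insert]
      have hnm : k x ∉ l.map k := by
        intro hm
        exact hc ((PySem.Dict.contains_iff_mem_keys _ _).mpr
          (by rw [pvBuild_keys]; exact (PySem.Set.mem_ofList _ _).mpr hm))
      by_cases hv : v = k x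
      · subst hv
        rw [if_pos rfl]
        have : l.filter (fun i => decide (k i = k x)) = [] := by
          rw [List.filter_eq_nil_iff]
          intro i hi hdi
          exact hnm ((by simpa using hdi) ▸ List.mem_map_of_mem hi)
        simp [this]
      · rw [if_neg hv, ih]
        have : (decide (k x = v)) = false := by simp; intro h; exact hv h.symm
        simp [this]

-- insertion step of the reverse-stable sort keeps pvR-sortedness when x is a fresh larger index
theorem pvInsertBy_pairwise (k : Int → Int) (x : Int) (acc : List Int)
    (h1 : acc.Pairwise (pvR k)) (h2 : ∀ a ∈ acc, a < x) :
    (PySem.List.insertBy (fun a b => decide (k b < k a)) x acc).Pairwise (pvR k) := by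
  induction acc with
  | nil => simp [PySem.List.insertBy]
  | cons y ys ih =>
    simp only [PySem.List.insertBy]
    by_cases hb : k y < k x
    · rw [if_pos (by simpa using hb)]
      refine List.Pairwise.cons ?_ h1
      intro z hz
      rcases List.mem_cons.mp hz with rfl | hz
      · exact Or.inl hb
      · rcases List.rel_of_pairwise_cons h1 hz with h | ⟨he, _⟩
        · exact Or.inl (lt_trans h hb)
        · exact Or.inl (he ▸ hb)
    · rw [if_neg (by simpa using hb)]
      refine List.Pairwise.cons ?_ (ih (List.Pairwise.of_cons h1) (fun a ha => h2 a (List.mem_cons_of_mem _ ha)))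
      intro z hz
      rcases (PySem.List.mem_insertBy _ _ _ _).mp hz with rfl | hz
      · rcases lt_or_eq_of_le (le_of_not_gt hb) with h | h
        · exact Or.inl h
        · exact Or.inr ⟨h.symm, h2 y (List.mem_cons_self)⟩
      · exact List.rel_of_pairwise_cons h1 hz

-- stability: the reverse sort of a strictly increasing index list is pvR-sorted
theorem pvSorted_rev_stable (k : Int → Int) (xs : List Int) (hxs : xs.Pairwise (· < ·)) :
    (PySem.List.sorted xs k true).Pairwise (pvR k) := by
  rw [PySem.List.sorted_rev_eq_foldl_insertBy]
  suffices h : ∀ (l : List Int) (acc : List Int), l.Pairwise (· < ·) →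
      acc.Pairwise (pvR k) → (∀ a ∈ acc, ∀ b ∈ l, a < b) →
      (l.foldl (fun acc x => PySem.List.insertBy (fun a b => decide (k b < k a)) x acc) acc).Pairwise (pvR k) by
    exact h xs [] hxs (by simp) (by simp)
  intro l
  induction l with
  | nil => intro acc _ h2 _; simpa using h2
  | cons x t ih =>
    intro acc h1 h2 h3
    simp only [List.foldl_cons]
    refine ih _ (List.Pairwise.of_cons h1) (pvInsertBy_pairwise k x acc h2 (fun a ha => h3 a ha x List.mem_cons_self)) ?_
    intro a ha b hb
    rcases (PySem.List.mem_insertBy _ _ _ _).mp ha with rfl | ha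
    · exact List.rel_of_pairwise_cons h1 hb
    · exact h3 a ha b (List.mem_cons_of_mem _ hb)

theorem pvSum_if (w : Int) (c : Nat) (vs : List Int) (hnd : vs.Nodup) :
    (vs.map (fun v => if w = v then c else 0)).sum = if w ∈ vs then c else 0 := by
  induction vs with
  | nil => simp
  | cons v t ih =>
    simp only [List.map_cons, List.sum_cons, List.mem_cons]
    by_cases hv : w = v
    · subst hv
      have : w ∉ t := (List.nodup_cons.mp hnd).1
      simp [this, ih (List.nodup_cons.mp hnd).2]
    · simp [hv, ih (List.nodup_cons.mp hnd).2]

theorem pvFlatMap_perm (k : Int → Int) (l : List Int) :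
    (List.flatMap (fun v => l.filter (fun i => decide (k i = v))) (PySem.Set.ofList (l.map k))).Perm l := by
  rw [List.perm_iff_count]
  intro a
  rw [List.count_flatMap]
  have hterm : ∀ v, (List.count a ∘ fun v => l.filter (fun i => decide (k i = v))) v
      = if k a = v then List.count a l else 0 := by
    intro v
    by_cases hv : k a = v
    · simp only [Function.comp_apply, if_pos hv]
      exact List.count_filter (by simp [hv])
    · simp only [Function.comp_apply, if_neg hv]
      rw [List.count_eq_zero]
      intro hm
      exact hv (by simpa using (List.mem_filter.mp hm).2)
  rw [List.map_congr_left (fun v _ => hterm v),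
      pvSum_if (k a) (List.count a l) _ (PySem.Set.nodup_ofList _)]
  by_cases ha : a ∈ l
  · rw [if_pos ((PySem.Set.mem_ofList _ _).mpr (List.mem_map_of_mem ha))]
  · rw [List.count_eq_zero.mpr ha]; simp

-- A's result, rewritten as the flatMap of score-buckets over the descending distinct scores
theorem pvA_eq_flatMap (scores : List Int) :
    scores_to_winners scores =
      List.flatMap
        (fun v => (PySem.List.pyRange 0 (PySem.List.len scores) 1).filter
          (fun i => decide (PySem.List.pyGetD scores i 0 = v)))
        (PySem.List.sorted
          (PySem.Set.ofList ((PySem.List.pyRange 0 (PySem.List.len scores) 1).map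
            (fun i => PySem.List.pyGetD scores i 0))) (fun x => x) true) := by
  show (PySem.List.sorted (PySem.Dict.keys _) (fun x => x) true).foldl _ [] = _
  have hstep : (fun (d : PySem.Dict Int (List Int)) (i : Int) =>
      if d.contains (PySem.List.pyGetD scores i 0) then
        d.modify (PySem.List.pyGetD scores i 0) [] (fun l => l ++ [i])
      else d.insert (PySem.List.pyGetD scores i 0) [i])
      = pvStep (fun i => PySem.List.pyGetD scores i 0) := rfl
  rw [hstep, pvBuild_keys]
  rw [PySem.List.foldl_congr_mem _ _
    (fun result key => result ++
      (PySem.List.pyRange 0 (PySem.List.len scores) 1).filter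
        (fun i => decide (PySem.List.pyGetD scores i 0 = key))) []
    (fun acc x _ => by rw [pvBuild_getD])]
  rw [PySem.List.foldl_append_eq_flatMap]
  rfl

theorem pvA_pairwise (scores : List Int) :
    (scores_to_winners scores).Pairwise (pvR (fun i => PySem.List.pyGetD scores i 0)) := by
  rw [pvA_eq_flatMap]
  rw [List.pairwise_flatMap]
  set k := fun i => PySem.List.pyGetD scores i 0 with hk
  set vs := PySem.List.sorted
      (PySem.Set.ofList ((PySem.List.pyRange 0 (PySem.List.len scores) 1).map k)) (fun x => x) true with hvs
  have hnd : vs.Nodup :=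
    (PySem.List.sorted_perm _ _ _).nodup_iff.mpr (PySem.Set.nodup_ofList _)
  constructor
  · intro v _
    refine List.Pairwise.imp_of_mem ?_
      (List.Pairwise.sublist List.filter_sublist (PySem.List.pairwise_lt_pyRange_one 0 (PySem.List.len scores)))
    intro a b ha hb hlt
    have hka : k a = v := by simpa using (List.mem_filter.mp ha).2
    have hkb : k b = v := by simpa using (List.mem_filter.mp hb).2
    exact Or.inr ⟨hka.trans hkb.symm, hlt⟩
  · have hdesc : vs.Pairwise (fun a b => b < a) := by
      refine List.Pairwise.imp_of_mem ?_
        ((PySem.List.sorted_pairwise_rev _ (fun x => x)).and hnd)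
      intro a b _ _ ⟨hle, hne⟩
      exact lt_of_le_of_ne hle (fun h => hne h.symm)
    refine hdesc.imp_of_mem ?_
    intro v1 v2 _ _ hlt x hx y hy
    have hkx : k x = v1 := by simpa using (List.mem_filter.mp hx).2
    have hky : k y = v2 := by simpa using (List.mem_filter.mp hy).2
    exact Or.inl (by rw [hkx, hky]; exact hlt)

theorem pvA_perm_range (scores : List Int) :
    (scores_to_winners scores).Perm (PySem.List.pyRange 0 (PySem.List.len scores) 1) := by
  rw [pvA_eq_flatMap]
  exact ((List.Perm.flatMap_right _ (PySem.List.sorted_perm _ _ _)).trans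
    (pvFlatMap_perm _ _))

-- ===== VERDICT (by name: the statement is the Claim_ definition above) =====
theorem scores_to_winners_spec : Claim_equal_scores_to_winners := by
  intro scores _
  unfold Spec_scores_to_winners
  set k := fun i => PySem.List.pyGetD scores i 0 with hk
  have hperm : (scores_to_winners scores).Perm (scores_to_winners_alt scores) :=
    (pvA_perm_range scores).trans (PySem.List.sorted_perm _ _ _).symm
  have hA := pvA_pairwise scores
  have hB : (scores_to_winners_alt scores).Pairwise (pvR k) :=
    pvSorted_rev_stable k _ (PySem.List.pairwise_lt_pyRange_one 0 (PySem.List.len scores))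
  exact List.Perm.eq_of_pairwise
    (fun a b _ _ h1 h2 => by
      rcases h1 with h1 | ⟨h1a, h1b⟩ <;> rcases h2 with h2 | ⟨h2a, h2b⟩ <;> omega)
    hA hB hperm
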